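-- pv_equiv track=rewrite | github.com/netor27/codefights-arcade-solutions | arcade/python/arcade-theCore/11_SpringOfIntegration/090_PairofShoes.py | pairOfShoes
-- ===== SOURCE A (Python) =====
-- def pairOfShoes(shoes):
--     if len(shoes) % 2 == 1:
--         return False
--
--     d = dict()
--     for s in shoes:
--         key = s[1]
--         value = (s[0] * -2) + 1
--         if key in d:
--             d[key] += value
--         else:
--             d[key] = value
--     return all(i == 0 for i in d.values())
-- ===== SOURCE B (Python) =====
-- def pairOfShoes(shoes):
--     if len(shoes) % 2 == 1:
--         return False
--     srt = sorted(shoes, key=lambda s: s[1])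
--     bal = 0
--     for i, s in enumerate(srt):
--         bal += 1 - 2 * s[0]
--         if i + 1 == len(srt) or srt[i + 1][1] != s[1]:
--             if bal != 0:
--                 return False
--             bal = 0
--     return True
-- ===== Notes on version B (the rewrite author's own statement) =====
-- stated objective: alternative
-- what changed: B sorts the shoes by size and checks each maximal run of equal sizes in a single linear scan with a resetting balance, instead of A's hash-dict of per-size running balances read back at the end.
import Mathlib
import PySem

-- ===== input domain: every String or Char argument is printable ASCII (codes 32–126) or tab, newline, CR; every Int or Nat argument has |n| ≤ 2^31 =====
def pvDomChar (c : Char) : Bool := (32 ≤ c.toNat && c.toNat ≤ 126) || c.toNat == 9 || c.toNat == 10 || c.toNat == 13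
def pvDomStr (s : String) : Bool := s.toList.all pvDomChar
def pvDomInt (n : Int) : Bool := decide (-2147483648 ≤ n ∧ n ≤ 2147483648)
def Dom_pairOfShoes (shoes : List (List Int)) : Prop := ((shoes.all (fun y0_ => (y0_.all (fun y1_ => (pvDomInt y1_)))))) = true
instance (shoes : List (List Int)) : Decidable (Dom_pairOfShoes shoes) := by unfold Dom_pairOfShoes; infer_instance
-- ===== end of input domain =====

-- B sorts the shoes by size and checks each maximal run of equal sizes in one
-- linear scan with a resetting balance, instead of A's dict of per-size balances
-- (objective: alternative).


-- ===== PORT A =====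
def pairOfShoes (shoes : List (List Int)) : Bool :=
  if shoes.length % 2 == 1 then false
  else
    let d := shoes.foldl (fun d s =>
      let key := s.getD 1 0                 -- s[1]; in range under Pre_
      let value := s.getD 0 0 * (-2) + 1    -- (s[0] * -2) + 1
      if d.contains key then d.modify key 0 (· + value)   -- d[key] += value
      else d.insert key value)                            -- d[key] = value
      (PySem.Dict.empty : PySem.Dict Int Int)
    d.values.all (fun i => i == 0)

-- ===== PORT B =====
-- the scan loop of Source B: running balance, reset (and checked) at each run boundary
def pvScanB : List (List Int) → Int → Bool
  | [], _ => true
  | s :: rest, bal =>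
    let bal := bal + (1 - 2 * s.getD 0 0)
    match rest with
    | [] => bal == 0                                       -- last run: loop ends, return True
    | n :: _ =>
      if n.getD 1 0 != s.getD 1 0 then bal == 0 && pvScanB rest 0
      else pvScanB rest bal

def pairOfShoes_alt (shoes : List (List Int)) : Bool :=
  if shoes.length % 2 == 1 then false
  else pvScanB (PySem.List.sorted shoes (fun s => s.getD 1 0) false) 0

-- ===== PRECONDITION & SPEC =====
-- Pre_ excludes exactly the inputs where the Python raises IndexError: an even-length
-- list containing a shoe with fewer than two entries (s[0]/s[1] out of range).
def Pre_pairOfShoes (shoes : List (List Int)) : Prop :=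
  shoes.length % 2 = 1 ∨ ∀ s ∈ shoes, 2 ≤ s.length
instance (shoes : List (List Int)) : Decidable (Pre_pairOfShoes shoes) := by
  unfold Pre_pairOfShoes; infer_instance
def pvWitness_pairOfShoes : List (List Int) := [[0, 7], [1, 7]]

def Spec_pairOfShoes (shoes : List (List Int)) (out : Bool) : Prop := out = pairOfShoes_alt shoes
instance (shoes : List (List Int)) (out : Bool) : Decidable (Spec_pairOfShoes shoes out) := by unfold Spec_pairOfShoes; infer_instance

-- ===== CLAIM (what is proved, stated in full; the proofs are below) =====
def Claim_equal_pairOfShoes : Prop := ∀ (shoes : List (List Int)), Dom_pairOfShoes shoes → Pre_pairOfShoes shoes → Spec_pairOfShoes shoes (pairOfShoes shoes)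

-- ===== LEMMAS AND PROOFS =====

-- abbreviations used throughout the proofs
def pvKey (s : List Int) : Int := s.getD 1 0
def pvW (s : List Int) : Int := 1 - 2 * s.getD 0 0
-- "the signed balance of size c over l is zero"
def pvBal (l : List (List Int)) (c : Int) : Prop :=
  ((l.filter (fun s => pvKey s == c)).map pvW).sum = 0

-- A's loop body (branch on membership) is the single Dict.modify step.
lemma stepA_eq_modify (d : PySem.Dict Int Int) (k v : Int) :
    (if d.contains k then d.modify k 0 (· + v) else d.insert k v)
      = d.modify k 0 (· + v) := by
  by_cases h : d.contains k = true
  · simp [h]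
  · simp only [Bool.not_eq_true] at h
    rw [if_neg (by simp [h])]
    simp only [PySem.Dict.modify, PySem.Dict.getD_of_not_contains d 0 h, zero_add]

-- A's balance at key c after the fold: the signed sum over the shoes of size c.
lemma getD_foldl_modify_add (l : List (List Int)) (d : PySem.Dict Int Int) (c : Int) :
    (l.foldl (fun d s => d.modify (pvKey s) 0 (· + (s.getD 0 0 * (-2) + 1))) d).getD c 0
      = d.getD c 0 + ((l.filter (fun s => pvKey s == c)).map pvW).sum := by
  induction l generalizing d with
  | nil => simp
  | cons s l ih =>
    simp only [List.foldl_cons, ih, List.filter_cons]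
    rw [PySem.Dict.getD_modify]
    by_cases h : pvKey s = c
    · rw [if_pos h.symm, if_pos (by simpa using h)]
      simp only [List.map_cons, List.sum_cons, pvW]
      rw [h]
      ring
    · rw [if_neg (fun hc => h hc.symm), if_neg (by simpa using h)]

-- A returns true iff the length is even and every present size balances.
lemma A_char (shoes : List (List Int)) :
    pairOfShoes shoes = true ↔
      shoes.length % 2 ≠ 1 ∧ ∀ c ∈ shoes.map pvKey, pvBal shoes c := by
  unfold pairOfShoes
  by_cases hodd : shoes.length % 2 = 1
  · simp [hodd]
  · rw [if_neg (by simpa using hodd)]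
    simp only [ne_eq, hodd, not_false_eq_true, true_and]
    have hA : (shoes.foldl (fun d s =>
        let key := s.getD 1 0
        let value := s.getD 0 0 * (-2) + 1
        if d.contains key then d.modify key 0 (· + value)
        else d.insert key value) (PySem.Dict.empty : PySem.Dict Int Int))
        = shoes.foldl (fun d s => d.modify (pvKey s) 0 (· + (s.getD 0 0 * (-2) + 1)))
            (PySem.Dict.empty : PySem.Dict Int Int) := by
      apply PySem.List.foldl_congr_mem
      intro d s _; exact stepA_eq_modify d _ _
    simp only [hA]
    set dA := shoes.foldl (fun d s => d.modify (pvKey s) 0 (· + (s.getD 0 0 * (-2) + 1)))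
      (PySem.Dict.empty : PySem.Dict Int Int) with hdA
    have hnd : dA.keys.Nodup := by
      rw [hdA]
      exact PySem.Dict.nodup_keys_foldl_modify_key _ _ _ _ _ (by simp)
    have hkeys : ∀ c, c ∈ dA.keys ↔ c ∈ shoes.map pvKey := by
      intro c
      rw [hdA, PySem.Dict.keys_foldl_modify_key]
      simp [PySem.Set.mem_update, PySem.Dict.empty]
    rw [PySem.Dict.values_eq_map_keys dA hnd 0, List.all_map, List.all_eq_true]
    have hgd : ∀ c, dA.getD c 0 = ((shoes.filter (fun s => pvKey s == c)).map pvW).sum := by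
      intro c; rw [hdA, getD_foldl_modify_add]; simp
    constructor
    · intro h c hc
      have := h c ((hkeys c).2 hc)
      simp only [Function.comp_def, beq_iff_eq, hgd] at this
      unfold pvBal
      exact this
    · intro h c hc
      have hb := h c ((hkeys c).1 hc)
      unfold pvBal at hb
      simp only [Function.comp_def, beq_iff_eq, hgd]
      exact hb

-- the first element surviving dropWhile fails the predicate
lemma dropWhile_head_false {α : Type} (p : α → Bool) (l : List α) (x : α) (xs : List α)
    (h : l.dropWhile p = x :: xs) : p x = false := by
  induction l with
  | nil => simp at h
  | cons a t ih =>
    by_cases hp : p a = true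
    · rw [List.dropWhile_cons_of_pos hp] at h; exact ih h
    · rw [List.dropWhile_cons_of_neg hp] at h
      cases h; simpa using hp

-- the scan across one maximal run: check the accumulated balance, then restart
lemma scanB_run (run rest : List (List Int)) (c : Int)
    (hhd : ∀ n ∈ rest.head?, pvKey n ≠ c) :
    ∀ b : Int, run ≠ [] → (∀ x ∈ run, pvKey x = c) →
    pvScanB (run ++ rest) b = ((b + (run.map pvW).sum == 0) && pvScanB rest 0) := by
  induction run with
  | nil => intro b hne _; exact absurd rfl hne
  | cons s run' ih =>
    intro b _ hrun
    have hks : pvKey s = c := hrun s (by simp)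
    cases run' with
    | nil =>
      cases rest with
      | nil => simp [pvScanB, pvW]
      | cons n rest' =>
        have hn : pvKey n ≠ c := hhd n (by simp)
        simp only [List.cons_append, List.nil_append, pvScanB]
        rw [if_pos (by
          simp only [bne_iff_ne, ne_eq, pvKey] at *
          rw [hks]; simpa using hn)]
        simp [pvW]
    | cons s' run'' =>
      have hks' : pvKey s' = c := hrun s' (by simp)
      have hcond : (s'.getD 1 0 != s.getD 1 0) = false := by
        have h : s'.getD 1 0 = s.getD 1 0 := by
          simpa [pvKey] using hks'.trans hks.symm
        simp only [List.getD] at h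
        simp [List.getD, h]
      rw [show pvScanB ((s :: s' :: run'') ++ rest) b
            = pvScanB ((s' :: run'') ++ rest) (b + (1 - 2 * s.getD 0 0)) from by
          simp only [List.cons_append, pvScanB, hcond, Bool.false_eq_true, if_false]]
      rw [ih (b + (1 - 2 * s.getD 0 0)) (by simp) (fun x hx => hrun x (by simp [hx]))]
      simp only [List.map_cons, List.sum_cons]
      congr 2
      simp only [pvW]
      ring

-- the scan on a size-sorted list checks exactly that every present size balances
lemma scanB_char : ∀ (n : ℕ) (l : List (List Int)), l.length ≤ n →
    l.Pairwise (fun a b => pvKey a ≤ pvKey b) →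
    (pvScanB l 0 = true ↔ ∀ c ∈ l.map pvKey, pvBal l c) := by
  intro n
  induction n with
  | zero =>
    intro l hl _
    have h : l = [] := List.eq_nil_of_length_eq_zero (Nat.le_zero.mp hl)
    subst h; simp [pvScanB, pvBal]
  | succ n ih =>
    intro l hl hp
    cases hl0 : l with
    | nil => simp [pvScanB, pvBal]
    | cons s t =>
      subst hl0
      set c := pvKey s with hc
      set run := (s :: t).takeWhile (fun x => pvKey x == c) with hrun
      set rest := (s :: t).dropWhile (fun x => pvKey x == c) with hrest
      have hsplit : run ++ rest = s :: t := List.takeWhile_append_dropWhile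
      have hrunne : run ≠ [] := by
        rw [hrun, List.takeWhile_cons_of_pos (by simp [hc])]; simp
      have hrunmem : ∀ x ∈ run, pvKey x = c := by
        intro x hx
        have := List.mem_takeWhile_imp (hrun ▸ hx)
        simpa using this
      have hrestsub : rest.Sublist (s :: t) := hrest ▸ List.dropWhile_sublist _
      have hrestgt : ∀ e ∈ rest, c < pvKey e := by
        intro e he
        cases hr : rest with
        | nil => simp [hr] at he
        | cons d rest' =>
          have hd : pvKey d ≠ c := by
            have := dropWhile_head_false _ _ _ _ (hrest.symm.trans (by rw [hr]))
            simpa using this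
          have hdt : d ∈ t := by
            have hdl : d ∈ s :: t := hrestsub.mem (by simp [hr])
            rcases List.mem_cons.1 hdl with h | h
            · rw [h] at hd; exact absurd hc.symm hd
            · exact h
          have hcd : c ≤ pvKey d := (List.pairwise_cons.1 hp).1 d hdt
          have hcdlt : c < pvKey d := lt_of_le_of_ne hcd (fun h => hd h.symm)
          rw [hr] at he
          rcases List.mem_cons.1 he with h | h
          · exact h ▸ hcdlt
          · have hpr : rest.Pairwise (fun a b => pvKey a ≤ pvKey b) :=
              List.Pairwise.sublist hrestsub hp
            rw [hr] at hpr
            exact lt_of_lt_of_le hcdlt ((List.pairwise_cons.1 hpr).1 e h)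
      have hrestlen : rest.length < (s :: t).length := by
        have : run.length + rest.length = (s :: t).length := by
          rw [← List.length_append, hsplit]
        have : 1 ≤ run.length := List.length_pos_iff.2 hrunne
        omega
      have hrestpw : rest.Pairwise (fun a b => pvKey a ≤ pvKey b) := List.Pairwise.sublist hrestsub hp
      have hhd : ∀ m ∈ rest.head?, pvKey m ≠ c := by
        intro m hm
        cases hr : rest with
        | nil => simp [hr] at hm
        | cons d rest' =>
          rw [hr] at hm; simp at hm; subst hm
          exact ne_of_gt (hrestgt d (by simp [hr]))
      have hscan : pvScanB (s :: t) 0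
          = (((run.map pvW).sum == 0) && pvScanB rest 0) := by
        rw [← hsplit, scanB_run run rest c hhd 0 hrunne hrunmem]
        simp
      -- filter characterisations
      have hfc : (s :: t).filter (fun x => pvKey x == c) = run := by
        rw [← hsplit, List.filter_append,
          List.filter_eq_self.2 (fun x hx => by simp [hrunmem x hx]),
          List.filter_eq_nil_iff.2 (fun x hx => by
            simp; exact ne_of_gt (hrestgt x hx)),
          List.append_nil]
      have hfc' : ∀ c', c' ≠ c →
          (s :: t).filter (fun x => pvKey x == c') = rest.filter (fun x => pvKey x == c') := by
        intro c' hc'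
        rw [← hsplit, List.filter_append,
          List.filter_eq_nil_iff.2 (fun x hx => by
            simp [hrunmem x hx]; exact fun h => hc' h.symm),
          List.nil_append]
      have hmap : (s :: t).map pvKey = run.map pvKey ++ rest.map pvKey := by
        rw [← hsplit, List.map_append]
      rw [hscan]
      have ihrest := ih rest (by omega) hrestpw
      constructor
      · intro h c' hc'
        have hand := h
        rw [Bool.and_eq_true] at hand
        by_cases hcc : c' = c
        · subst hcc
          unfold pvBal
          rw [hfc]
          simpa using hand.1
        · have hc't : c' ∈ rest.map pvKey := by
            rw [hmap] at hc'
            rcases List.mem_append.1 hc' with h1 | h1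
            · exfalso
              rcases List.mem_map.1 h1 with ⟨x, hx, hxk⟩
              exact hcc (hxk ▸ (hrunmem x hx ▸ rfl))
            · exact h1
          have := ihrest.1 hand.2 c' hc't
          unfold pvBal at this ⊢
          rw [hfc' c' hcc]
          exact this
      · intro h
        rw [Bool.and_eq_true]
        constructor
        · have hcmem : c ∈ (s :: t).map pvKey := by simp [hc]
          have := h c hcmem
          unfold pvBal at this
          rw [hfc] at this
          simpa using this
        · apply ihrest.2
          intro c' hc'
          have hc'ne : c' ≠ c := by
            rcases List.mem_map.1 hc' with ⟨x, hx, hxk⟩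
            exact hxk ▸ ne_of_gt (hrestgt x hx)
          have hmem : c' ∈ (s :: t).map pvKey := by
            rw [hmap]; exact List.mem_append.2 (Or.inr hc')
          have := h c' hmem
          unfold pvBal at this ⊢
          rw [hfc' c' hc'ne] at this
          exact this

-- balances transfer along a permutation
lemma bal_of_perm (l l' : List (List Int)) (h : l.Perm l') (c : Int) :
    pvBal l c ↔ pvBal l' c := by
  unfold pvBal
  rw [List.Perm.sum_eq ((h.filter _).map _)]

-- ===== VERDICT (by name: the statement is the Claim_ definition above) =====
theorem pairOfShoes_spec : Claim_equal_pairOfShoes := by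
  intro shoes _ _
  unfold Spec_pairOfShoes
  rw [Bool.eq_iff_iff, A_char]
  unfold pairOfShoes_alt
  by_cases hodd : shoes.length % 2 = 1
  · simp [hodd]
  · rw [if_neg (by simpa using hodd)]
    set srt := PySem.List.sorted shoes (fun s => s.getD 1 0) false with hsrt
    have hperm : srt.Perm shoes := PySem.List.sorted_perm ..
    have hpw : srt.Pairwise (fun a b => pvKey a ≤ pvKey b) :=
      PySem.List.sorted_pairwise ..
    rw [scanB_char srt.length srt le_rfl hpw]
    constructor
    · intro h c hc
      rw [bal_of_perm srt shoes hperm]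
      exact h.2 c ((hperm.map pvKey).mem_iff.1 hc)
    · intro h
      refine ⟨hodd, fun c hc => ?_⟩
      rw [← bal_of_perm srt shoes hperm]
      exact h c ((hperm.map pvKey).mem_iff.2 hc)
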